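-- pv_equiv track=rewrite | github.com/sksmaed/113-1-DB-Final-Project-Group-5 | Dataset/data/randData.py | generate_sequential_letters
-- ===== SOURCE A (Python) =====
-- import string
--
-- def generate_sequential_letters(amount):
--     if amount <= 26:
--         # Generate single letters
--         return list(string.ascii_uppercase[:amount])
--     else:
--         # Generate letters starting from "A" to "ZZ" (or more)
--         letters = []
--         for first in string.ascii_uppercase:
--             for second in string.ascii_uppercase:
--                 letters.append(first + second)
--                 if len(letters) >= amount:
--                     return letters
--         return letters  # This handles cases if amount is beyond "ZZ"
-- ===== SOURCE B (Python) =====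
-- import string
--
-- def generate_sequential_letters(amount):
--     U = string.ascii_uppercase
--     if amount <= 26:
--         return list(U[:amount])
--     n = min(amount, 676)
--     return [U[i // 26] + U[i % 26] for i in range(n)]
-- ===== Notes on version B (the rewrite author's own statement) =====
-- stated objective: simpler
-- what changed: The amount>26 case replaces the nested letter loops with a running-length early-exit by a closed-form comprehension that derives each two-letter label from its index i as U[i//26]+U[i%26] over range(min(amount,676)).
import Mathlib
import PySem

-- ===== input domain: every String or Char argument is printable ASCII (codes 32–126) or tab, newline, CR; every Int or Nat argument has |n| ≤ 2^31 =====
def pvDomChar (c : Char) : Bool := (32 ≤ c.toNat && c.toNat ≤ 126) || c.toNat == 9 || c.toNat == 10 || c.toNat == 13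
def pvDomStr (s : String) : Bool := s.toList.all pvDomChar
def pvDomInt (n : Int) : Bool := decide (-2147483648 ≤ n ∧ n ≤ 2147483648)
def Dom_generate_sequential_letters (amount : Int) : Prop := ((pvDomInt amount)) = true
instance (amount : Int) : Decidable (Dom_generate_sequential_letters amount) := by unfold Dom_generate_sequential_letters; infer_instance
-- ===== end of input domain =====

-- B derives each two-letter label from its numeric index (closed form) instead of A's
-- nested loops with a running-length early exit; same return value, objective: simpler.


-- string.ascii_uppercase as a list of characters
def pvUpper : List Char :=
  ['A','B','C','D','E','F','G','H','I','J','K','L','M','N','O','P','Q','R','S','T','U','V','W','X','Y','Z']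

-- first + second (concatenation of two 1-character strings)
def pvPair (f c : Char) : String := String.ofList [f, c]

-- ===== PORT A =====
-- inner 'for second in string.ascii_uppercase' loop; Bool flag = 'the early return fired'
def pvInnerA (f : Char) : List Char → List String → Int → (List String × Bool)
  | [], letters, _ => (letters, false)
  | c :: rest, letters, amount =>
    let letters' := letters ++ [pvPair f c]
    if (letters'.length : Int) ≥ amount then (letters', true)
    else pvInnerA f rest letters' amount

-- outer 'for first in string.ascii_uppercase' loop
def pvOuterA : List Char → List String → Int → List String
  | [], letters, _ => letters
  | f :: rest, letters, amount =>
    match pvInnerA f pvUpper letters amount with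
    | (l, true) => l
    | (l, false) => pvOuterA rest l amount

def generate_sequential_letters (amount : Int) : List String :=
  if amount ≤ 26 then
    (PySem.List.slice pvUpper none (some amount)).map (fun c => String.ofList [c])
  else
    pvOuterA pvUpper [] amount

-- ===== PORT B =====
-- U[i // 26] + U[i % 26]; the indices are always in range, so .getD 'A' is never the default
def pvPairIdx (i : Int) : String :=
  String.ofList [(PySem.List.pyGet? pvUpper (PySem.Int.floordiv i 26)).getD 'A',
             (PySem.List.pyGet? pvUpper (PySem.Int.mod i 26)).getD 'A']

def generate_sequential_letters_alt (amount : Int) : List String :=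
  if amount ≤ 26 then
    (PySem.List.slice pvUpper none (some amount)).map (fun c => String.ofList [c])
  else
    (PySem.List.pyRange 0 (min amount 676) 1).map pvPairIdx

-- ===== PRECONDITION & SPEC =====
def Spec_generate_sequential_letters (amount : Int) (out : List String) : Prop := out = generate_sequential_letters_alt amount
instance (amount : Int) (out : List String) : Decidable (Spec_generate_sequential_letters amount out) := by unfold Spec_generate_sequential_letters; infer_instance

-- ===== CLAIM (what is proved, stated in full; the proofs are below) =====
def Claim_equal_generate_sequential_letters : Prop := ∀ (amount : Int), Dom_generate_sequential_letters amount → Spec_generate_sequential_letters amount (generate_sequential_letters amount)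

-- ===== LEMMAS AND PROOFS =====

-- all 676 two-letter labels in order
def pvAllPairs : List String := pvUpper.flatMap (fun f => pvUpper.map (pvPair f))

lemma pvInnerA_eq (cs : List Char) (f : Char) (letters : List String) (amount : Int)
    (h : (letters.length : Int) < amount) :
    pvInnerA f cs letters amount =
      (letters ++ (cs.take (amount - letters.length).toNat).map (pvPair f),
       decide ((amount - (letters.length : Int)).toNat ≤ cs.length)) := by
  induction cs generalizing letters with
  | nil =>
    simp [pvInnerA]
    omega
  | cons c rest ih =>
    simp only [pvInnerA]
    by_cases hge : (((letters ++ [pvPair f c]).length : Nat) : Int) ≥ amount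
    · have hr : (amount - (letters.length : Int)).toNat = 1 := by
        simp at hge; omega
      rw [if_pos hge]
      simp [hr]
    · have h' : (((letters ++ [pvPair f c]).length : Nat) : Int) < amount := by omega
      rw [if_neg hge, ih _ h']
      have hlen : ((letters ++ [pvPair f c]).length : Int) = (letters.length : Int) + 1 := by
        simp
      have hr : (amount - (letters.length : Int)).toNat =
          (amount - ((letters ++ [pvPair f c]).length : Int)).toNat + 1 := by
        simp at h' ⊢; omega
      rw [hr]
      simp [List.append_assoc]

lemma pvOuterA_eq (fs : List Char) (letters : List String) (amount : Int)
    (h : (letters.length : Int) < amount) :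
    pvOuterA fs letters amount =
      letters ++ (fs.flatMap (fun f => pvUpper.map (pvPair f))).take
        (amount - (letters.length : Int)).toNat := by
  induction fs generalizing letters with
  | nil => simp [pvOuterA]
  | cons f rest ih =>
    simp only [pvOuterA]
    rw [pvInnerA_eq pvUpper f letters amount h]
    have h26 : pvUpper.length = 26 := rfl
    by_cases hle : (amount - (letters.length : Int)).toNat ≤ 26
    · rw [h26]
      simp only [hle, decide_true]
      rw [List.flatMap_cons, List.take_append_of_le_length (by simpa [h26] using hle)]
      simp [List.map_take]
    · rw [h26]
      simp only [hle, decide_false]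
      have htake : pvUpper.take (amount - (letters.length : Int)).toNat = pvUpper := by
        apply List.take_of_length_le; omega
      rw [htake]
      have h' : (((letters ++ pvUpper.map (pvPair f)).length : Nat) : Int) < amount := by
        simp [h26]; omega
      rw [ih _ h']
      have hr : (amount - ((letters ++ pvUpper.map (pvPair f)).length : Int)).toNat
          = (amount - (letters.length : Int)).toNat - 26 := by
        simp [h26]; omega
      rw [hr, List.flatMap_cons, List.take_append]
      rw [List.take_of_length_le (l := pvUpper.map (pvPair f)) (by simp [h26]; omega)]
      simp [List.append_assoc, h26]

-- B's comprehension over all 676 indices is exactly the full pair list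
set_option maxRecDepth 20000 in
lemma pvRange676 : (List.range 676).map (fun k => pvPairIdx (Int.ofNat k)) = pvAllPairs := by decide

set_option maxRecDepth 20000 in
lemma pvAllPairs_length : pvAllPairs.length = 676 := by decide

lemma pvMapRange_eq_take (m : Nat) (hm : m ≤ 676) :
    (List.range m).map (fun k => pvPairIdx (Int.ofNat k)) = pvAllPairs.take m := by
  have h1 : List.range m = (List.range 676).take m := by
    rw [List.take_range]; congr 1; omega
  rw [h1, List.map_take, pvRange676]

theorem generate_sequential_letters_spec : Claim_equal_generate_sequential_letters := by
  intro amount _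
  unfold Spec_generate_sequential_letters generate_sequential_letters generate_sequential_letters_alt
  by_cases h : amount ≤ 26
  · rw [if_pos h, if_pos h]
  · rw [if_neg h, if_neg h]
    have h0 : ((([] : List String).length : Nat) : Int) < amount := by simp; omega
    rw [pvOuterA_eq pvUpper [] amount h0, PySem.List.pyRange_one, List.map_map]
    have hcomp : (pvPairIdx ∘ fun k : Nat => (0 : Int) + (k : Int))
        = fun k : Nat => pvPairIdx (Int.ofNat k) := by
      funext k; simp [Int.ofNat_eq_natCast]
    rw [hcomp]
    have hM : ((min amount 676 - 0).toNat) = (min amount 676).toNat := by omega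
    rw [hM, pvMapRange_eq_take (min amount 676).toNat (by omega)]
    show ([] : List String) ++ pvAllPairs.take _ = _
    rw [List.nil_append]
    have hA : (amount - (([] : List String).length : Int)).toNat = amount.toNat := by
      simp
    rw [hA]
    by_cases h676 : amount ≤ 676
    · congr 1
      omega
    · have h1 : pvAllPairs.take amount.toNat = pvAllPairs := by
        apply List.take_of_length_le; rw [pvAllPairs_length]; omega
      have h2 : pvAllPairs.take (min amount 676).toNat = pvAllPairs := by
        apply List.take_of_length_le; rw [pvAllPairs_length]; omega
      rw [h1, h2]
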